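-- pv_equiv track=rewrite | github.com/alexandraback/datacollection | solutions_5636311922769920_1/Python/varung97/fractiles.py | fractiles
-- ===== SOURCE A (Python) =====
-- import sys, math
--
-- def fractiles(K, C, S):
--     if S < math.ceil(float(K) / C):
--         return 'IMPOSSIBLE'
--     else:
--         ans = ''
--         for start in range(1, K + 1, C):
--             curr = start
--             i = curr if curr != K else curr - 1
--             for j in range(1, C):
--                 curr = (curr - 1) * K + i + 1
--                 if i != K - 1:
--                     i += 1
--             ans += str(curr) + ' '
--         return ans[:-1]
-- ===== SOURCE B (Python) =====
-- import math
--
-- def fractiles(K, C, S):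
--     # Closed-form positional formula: each examined tile's index is
--     # start*K^(C-1) plus independent per-position corrections for the
--     # at most min(C-1, K-start) positions before the digits saturate at K;
--     # the needed powers of K are tabulated once.
--     if S < math.ceil(float(K) / C):
--         return 'IMPOSSIBLE'
--     starts = range(1, K + 1, C)
--     if not starts:
--         return ''
--     p = 1
--     pw = [1]
--     for _ in range(1, C):
--         p *= K
--         pw.append(p)
--     return ' '.join(
--         str(start * p
--             + sum((start + j - K) * pw[C - 1 - j]
--                   for j in range(1, min(C - 1, K - start) + 1)))
--         for start in starts)
-- ===== Notes on version B (the rewrite author's own statement) =====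
-- stated objective: alternative
-- what changed: Replaces A's sequential per-tile recurrence (running curr with acc=(acc-1)*K+i+1 and a clamp counter i, string accumulation trimmed by [:-1]) with a closed-form positional formula: each tile's index is start*K^(C-1) plus independent correction terms (start+j-K)*K^(C-1-j) for the at most min(C-1,K-start) unsaturated positions, read from a power table built once and collected with ' '.join.
import Mathlib
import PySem

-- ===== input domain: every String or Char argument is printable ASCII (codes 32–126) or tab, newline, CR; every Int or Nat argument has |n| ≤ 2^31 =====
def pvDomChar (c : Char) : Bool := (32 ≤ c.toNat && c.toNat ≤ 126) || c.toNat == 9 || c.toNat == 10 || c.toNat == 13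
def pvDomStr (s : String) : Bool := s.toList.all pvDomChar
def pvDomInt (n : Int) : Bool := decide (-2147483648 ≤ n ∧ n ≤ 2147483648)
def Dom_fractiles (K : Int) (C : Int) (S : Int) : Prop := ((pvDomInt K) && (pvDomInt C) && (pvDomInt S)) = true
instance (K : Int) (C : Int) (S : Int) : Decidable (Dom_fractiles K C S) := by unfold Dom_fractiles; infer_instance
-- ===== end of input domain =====

-- B replaces A's sequential recurrence (running curr with acc=(acc-1)*K+i+1 and clamp counter i,
-- string accumulation trimmed with [:-1]) by a closed-form positional formula per tile over a
-- precomputed power table, collected with ' '.join.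

-- ===== PORT A =====
-- math.ceil(float(K) / C) ported as the exact ceiling -((-K) // C); exact on |K|,|C| ≤ 2^31
-- (float division of such ints is correctly rounded, so its ceil equals the exact ceil).
def fractiles (K : Int) (C : Int) (S : Int) : String :=
  if S < -(PySem.Int.floordiv (-K) C) then "IMPOSSIBLE"
  else
    let ans : String :=
      (PySem.List.pyRange 1 (K + 1) C).foldl (fun ans start =>
        let curr := start
        let i := if curr ≠ K then curr else curr - 1
        let p := (PySem.List.pyRange 1 C 1).foldl
          (fun (p : Int × Int) (_j : Int) =>
            ((p.1 - 1) * K + p.2 + 1, if p.2 ≠ K - 1 then p.2 + 1 else p.2))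
          (curr, i)
        ans ++ PySem.Int.toStr p.1 ++ " ") ""
    PySem.Str.slice ans none (some (-1))

-- ===== PORT B =====
-- Python B's table loop 'p *= K; pw.append(p)' as a fold over the same range, state (p, pw).
def pwBuild (K : Int) (C : Int) : Int × List Int :=
  (PySem.List.pyRange 1 C 1).foldl
    (fun (st : Int × List Int) (_ : Int) => (st.1 * K, st.2 ++ [st.1 * K])) (1, [1])

-- pw[C-1-j] is only read at in-range nonnegative indices, where pyGetD = Python's pw[C-1-j].
def fractiles_alt (K : Int) (C : Int) (S : Int) : String :=
  if S < -(PySem.Int.floordiv (-K) C) then "IMPOSSIBLE"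
  else if (PySem.List.pyRange 1 (K + 1) C).isEmpty then ""
  else
    PySem.Str.join " "
      ((PySem.List.pyRange 1 (K + 1) C).map (fun start =>
        PySem.Int.toStr
          (start * (pwBuild K C).1 +
            ((PySem.List.pyRange 1 (min (C - 1) (K - start) + 1) 1).map
              (fun j => (start + j - K) * PySem.List.pyGetD (pwBuild K C).2 (C - 1 - j) 0)).sum)))

-- ===== PRECONDITION & SPEC =====
-- Pre_ excludes only C = 0, where Python A raises ZeroDivisionError.
def Pre_fractiles (K : Int) (C : Int) (S : Int) : Prop := C ≠ 0
instance (K : Int) (C : Int) (S : Int) : Decidable (Pre_fractiles K C S) := by unfold Pre_fractiles; infer_instance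
def pvWitness_fractiles : Int × Int × Int := (4, 2, 2)
def Spec_fractiles (K : Int) (C : Int) (S : Int) (out : String) : Prop := out = fractiles_alt K C S
instance (K : Int) (C : Int) (S : Int) (out : String) : Decidable (Spec_fractiles K C S out) := by unfold Spec_fractiles; infer_instance

-- ===== CLAIM (what is proved, stated in full; the proofs are below) =====
def Claim_equal_fractiles : Prop := ∀ (K : Int) (C : Int) (S : Int), Dom_fractiles K C S → Pre_fractiles K C S → Spec_fractiles K C S (fractiles K C S)

-- ===== LEMMAS AND PROOFS =====

-- splitting range(1, n+1) at its right end, the form the inductions use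
theorem pyRange_split_last (m : Nat) :
    PySem.List.pyRange 1 (1 + ((m + 1 : Nat) : Int)) 1
    = PySem.List.pyRange 1 (1 + (m : Int)) 1 ++ [1 + (m : Int)] := by
  have := PySem.List.pyRange_one_succ_right (a := 1) (b := 1 + (m : Int)) (by omega)
  push_cast
  push_cast at this
  rw [show (1:Int) + ((m:Int) + 1) = 1 + (m:Int) + 1 by ring, this]

-- the power table: p ends at K^n, pw lists the powers K^0 … K^n
theorem pwBuild_eq (K : Int) (n : Nat) :
    pwBuild K (1 + (n : Int))
    = (K ^ n, (PySem.List.pyRange 0 (1 + (n : Int)) 1).map (fun e => K ^ e.toNat)) := by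
  induction n with
  | zero =>
      simp [pwBuild]
      have h01 : PySem.List.pyRange 0 1 1 = [0] := by
        have := PySem.List.pyRange_one_singleton (a := (0 : Int))
        simpa using this
      rw [h01]
      simp
  | succ m ih =>
      unfold pwBuild
      rw [pyRange_split_last m]
      unfold pwBuild at ih
      rw [List.foldl_append, ih]
      simp only [List.foldl]
      have h2 : PySem.List.pyRange 0 (1 + ((m + 1 : Nat) : Int)) 1
          = PySem.List.pyRange 0 (1 + (m : Int)) 1 ++ [1 + (m : Int)] := by
        have := PySem.List.pyRange_one_succ_right (a := 0) (b := 1 + (m : Int)) (by omega)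
        push_cast
        push_cast at this
        rw [show (1:Int) + ((m:Int) + 1) = 1 + (m:Int) + 1 by ring, this]
      rw [h2]
      simp only [List.map_append, List.map, Prod.mk.injEq]
      refine ⟨by ring, by rw [show ((1 + (m:Int))).toNat = m + 1 by omega]; rw [pow_succ]⟩

-- reading the table at an in-range index gives the power
theorem pw_get (K : Int) (n : Nat) (i : Int) (h0 : 0 ≤ i) (h1 : i < 1 + (n : Int)) :
    PySem.List.pyGetD (pwBuild K (1 + (n : Int))).2 i 0 = K ^ i.toNat := by
  rw [pwBuild_eq]
  rw [PySem.List.pyGetD_map_pyRange_of_nonneg _ _ _ _ h0 h1]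

-- the (curr, i) state of A's inner loop, as one step
def stepA (K : Int) (p : Int × Int) : Int × Int :=
  ((p.1 - 1) * K + p.2 + 1, if p.2 ≠ K - 1 then p.2 + 1 else p.2)

-- proof-side name for A's recurrence (Horner over the capped digits)
def hornerA (K start : Int) (ds : List Int) : Int :=
  ds.foldl (fun acc d => (acc - 1) * K + d) start

-- A's inner loop computes the Horner recurrence over digits min(start+j, K),
-- with the clamp counter characterised as min
theorem innerA_eq (K start : Int) (h : start ≤ K) (n : Nat) :
    (PySem.List.pyRange 1 (1 + (n : Int)) 1).foldl (fun p (_ : Int) => stepA K p)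
      (start, if start ≠ K then start else start - 1)
    = (hornerA K start ((PySem.List.pyRange 1 (1 + (n : Int)) 1).map (fun j => min (start + j) K)),
       min (start + n) (K - 1)) := by
  induction n with
  | zero =>
      simp [hornerA]
      split <;> omega
  | succ m ih =>
      rw [pyRange_split_last m]
      simp only [List.foldl_append, List.map_append, ih]
      simp only [hornerA, List.foldl_append, List.map, List.foldl, stepA, Prod.mk.injEq]
      constructor
      · rw [show min (start + (1 + (m:Int))) K = min (start + (m:Int)) (K - 1) + 1 by omega]
        ring
      · split <;> push_cast <;> omega

-- the Horner recurrence over any digit list indexed by range(1, n+1)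
-- equals the positional closed form
theorem horner_closed (K s : Int) (f : Int → Int) (n : Nat) :
    hornerA K s ((PySem.List.pyRange 1 (1 + (n : Int)) 1).map f)
    = s * K ^ n +
        ((PySem.List.pyRange 1 (1 + (n : Int)) 1).map
          (fun j => (f j - K) * K ^ (((n : Int) - j)).toNat)).sum := by
  induction n with
  | zero => simp [hornerA, PySem.List.pyRange_one_eq_nil (by omega : (1:Int) + 0 ≤ 1)]
  | succ m ih =>
      rw [pyRange_split_last m]
      simp only [List.map_append, List.sum_append, List.map, List.sum_cons, List.sum_nil]
      have hlast : hornerA K s ((PySem.List.pyRange 1 (1 + (m : Int)) 1).map f ++ [f (1 + (m : Int))])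
          = (hornerA K s ((PySem.List.pyRange 1 (1 + (m : Int)) 1).map f) - 1) * K + f (1 + (m : Int)) := by
        simp [hornerA]
      rw [hlast, ih]
      have hshift :
          ((PySem.List.pyRange 1 (1 + (m : Int)) 1).map
            (fun j => (f j - K) * K ^ ((((m + 1 : Nat) : Int) - j)).toNat)).sum
          = ((PySem.List.pyRange 1 (1 + (m : Int)) 1).map
            (fun j => (f j - K) * K ^ (((m : Int) - j)).toNat)).sum * K := by
        rw [← List.sum_map_mul_right]
        apply congrArg
        apply List.map_congr_left
        intro j hj
        have hb := (PySem.List.mem_pyRange_one).mp hj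
        have he : ((((m + 1 : Nat) : Int) - j)).toNat = (((m : Int) - j)).toNat + 1 := by
          push_cast; omega
        rw [he, pow_succ]
        ring
      rw [hshift]
      have hexp : ((((m + 1 : Nat) : Int)) - (1 + (m : Int))).toNat = 0 := by push_cast; omega
      rw [hexp]
      push_cast
      ring

-- corrections beyond the saturation point min(n, K-s) are zero, so the full clamped
-- sum equals B's truncated unclamped sum
theorem sum_truncate (K s : Int) (n : Nat) (hs : s ≤ K) :
    ((PySem.List.pyRange 1 (1 + (n : Int)) 1).map
      (fun j => (min (s + j) K - K) * K ^ (((n : Int) - j)).toNat)).sum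
    = ((PySem.List.pyRange 1 (min (n : Int) (K - s) + 1) 1).map
      (fun j => (s + j - K) * K ^ (((n : Int) - j)).toNat)).sum := by
  have ht0 : 0 ≤ min (n : Int) (K - s) := by omega
  have hsplit := PySem.List.pyRange_one_append 1 (min (n : Int) (K - s) + 1) (1 + (n : Int))
    (by omega) (by omega)
  rw [hsplit, List.map_append, List.sum_append]
  have hzero : ((PySem.List.pyRange (min (n : Int) (K - s) + 1) (1 + (n : Int)) 1).map
      (fun j => (min (s + j) K - K) * K ^ (((n : Int) - j)).toNat)).sum = 0 := by
    apply List.sum_eq_zero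
    intro x hx
    obtain ⟨j, hj, rfl⟩ := List.mem_map.mp hx
    have hb := (PySem.List.mem_pyRange_one).mp hj
    have : min (s + j) K = K := by omega
    rw [this]
    ring
  rw [hzero, add_zero]
  apply congrArg
  apply List.map_congr_left
  intro j hj
  have hb := (PySem.List.mem_pyRange_one).mp hj
  have : min (s + j) K = s + j := by omega
  rw [this]

-- trimming the trailing space from the accumulated string = joining with spaces
theorem chars_trim_eq_join (ss : List (List Char)) :
    (ss.foldl (fun a s => a ++ s ++ [' ']) []).dropLast = PySem.Chars.join [' '] ss := by
  have hflat : ∀ (ts : List (List Char)) (a : List Char),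
      ts.foldl (fun a s => a ++ s ++ [' ']) a = a ++ ts.flatMap (fun s => s ++ [' ']) := by
    intro ts
    induction ts with
    | nil => simp
    | cons x xs ih => intro a; simp [List.foldl_cons, List.flatMap_cons, List.append_assoc, ← List.flatMap_def]
  rw [hflat, List.nil_append]
  induction ss with
  | nil => simp [PySem.Chars.join_nil]
  | cons x xs ih =>
      cases xs with
      | nil =>
          simp only [List.flatMap_cons, List.flatMap_nil, List.append_nil,
            PySem.Chars.join_singleton]
          rw [List.dropLast_concat]
      | cons y ys =>
          have hne : (y :: ys).flatMap (fun s => s ++ [' ']) ≠ [] := by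
            simp [List.flatMap_cons]
          rw [List.flatMap_cons, PySem.Chars.join_cons_cons, List.append_assoc,
            List.append_assoc,
            List.dropLast_append_of_ne_nil (by simp),
            List.dropLast_append_of_ne_nil hne, ih]

-- the string-level version: A's accumulate-then-trim = ' '.join over the mapped list
theorem foldl_str_eq_join (l : List Int) (f : Int → String) :
    PySem.Str.slice (l.foldl (fun a x => a ++ f x ++ " ") "") none (some (-1))
      = PySem.Str.join " " (l.map f) := by
  apply String.toList_inj.mp
  rw [PySem.Str.slice_to_neg_one, PySem.Str.toList_join]
  have hfold : (l.foldl (fun a x => a ++ f x ++ " ") "").toList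
      = (l.map (fun x => (f x).toList)).foldl (fun a s => a ++ s ++ [' ']) [] := by
    have key : ∀ (a : String), (l.foldl (fun a x => a ++ f x ++ " ") a).toList
        = (l.map (fun x => (f x).toList)).foldl (fun a s => a ++ s ++ [' ']) a.toList := by
      induction l with
      | nil => intro a; simp
      | cons x xs ih =>
          intro a
          simp only [List.foldl_cons, List.map_cons, ih, String.toList_append]
          rfl
    simpa using key ""
  rw [hfold, chars_trim_eq_join]
  have hsep : (" " : String).toList = [' '] := rfl
  rw [hsep, List.map_map]
  rfl

-- ===== VERDICT (by name: the statement is the Claim_ definition above) =====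
theorem fractiles_spec : Claim_equal_fractiles := by
  intro K C S _hDom hPre
  unfold Spec_fractiles fractiles fractiles_alt
  split
  · rfl
  · split
    · rename_i hemp
      rw [List.isEmpty_iff.mp hemp]
      rfl
    · simp only []
      rw [foldl_str_eq_join]
      congr 1
      apply List.map_congr_left
      intro start hmem
      by_cases hC : C ≤ 1
      · -- no digit positions: A's inner loop and B's correction sum are both empty
        rw [PySem.List.pyRange_one_eq_nil hC]
        have ht : min (C - 1) (K - start) + 1 ≤ 1 := by
          omega
        rw [PySem.List.pyRange_one_eq_nil ht]
        have hpw : (pwBuild K C).1 = 1 := by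
          unfold pwBuild
          rw [PySem.List.pyRange_one_eq_nil hC]
          rfl
        simp [hpw]
      · have hCpos : 0 < C := by omega
        obtain ⟨h1, h2, -⟩ := ((PySem.List.mem_pyRange_iff_of_pos hCpos) start).mp hmem
        have hsK : start ≤ K := by omega
        have hn : ∃ n : Nat, C = 1 + (n : Int) := ⟨(C - 1).toNat, by omega⟩
        obtain ⟨n, rfl⟩ := hn
        have hA := innerA_eq K start hsK n
        simp only [stepA] at hA
        rw [hA, horner_closed, sum_truncate K start n hsK]
        have hfst : (pwBuild K (1 + (n : Int))).1 = K ^ n := by rw [pwBuild_eq]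
        have hminC : min (1 + (n : Int) - 1) (K - start) = min (n : Int) (K - start) := by
          omega
        have hmap : List.map
              (fun j => (start + j - K) * PySem.List.pyGetD (pwBuild K (1 + (n : Int))).2 (1 + (n : Int) - 1 - j) 0)
              (PySem.List.pyRange 1 (min (n : Int) (K - start) + 1) 1)
            = List.map (fun j => (start + j - K) * K ^ (((n : Int) - j)).toNat)
              (PySem.List.pyRange 1 (min (n : Int) (K - start) + 1) 1) := by
          apply List.map_congr_left
          intro j hj
          have hb := (PySem.List.mem_pyRange_one).mp hj
          rw [show (1 + (n : Int) - 1 - j) = (n : Int) - j by ring,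
            pw_get K n ((n : Int) - j) (by omega) (by omega)]
        rw [hfst, hminC, hmap]
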